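-- pv_equiv track=rewrite | github.com/549070609/NeuroForge | demo/pyagentforge/pyagentforge/plugins/tools/file_tools/PLUGIN.py | _truncate_end
-- ===== SOURCE A (Python) =====
-- def _truncate_end(content: str, max_length: int) -> str:
--     """Truncate end"""
--     lines = content.split("\n")
--     result_lines = []
--     current_length = 0
--
--     for line in lines:
--         if current_length + len(line) + 1 > max_length - 50:
--             break
--         result_lines.append(line)
--         current_length += len(line) + 1
--
--     omitted = len(lines) - len(result_lines)
--     return "\n".join(result_lines) + f"\n\n... ({omitted} more lines truncated)"
-- ===== SOURCE B (Python) =====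
-- def _truncate_end(content: str, max_length: int) -> str:
--     """Truncate end"""
--     lines = content.split("\n")
--     budget = max_length - 50
--     prefix = []
--     total = 0
--     for line in lines:
--         total += len(line) + 1
--         prefix.append(total)
--     kept = sum(1 for p in prefix if p <= budget)
--     omitted = len(lines) - kept
--     return "\n".join(lines[:kept]) + f"\n\n... ({omitted} more lines truncated)"
-- ===== Notes on version B (the rewrite author's own statement) =====
-- stated objective: alternative
-- what changed: Replaces A's single pass with a running accumulator and an early break by a two-phase computation: build the full prefix-sum table of cumulative line costs, count how many prefix sums fit the budget (valid because the prefix sums are strictly increasing), and slice the kept lines off the front.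
import Mathlib
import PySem

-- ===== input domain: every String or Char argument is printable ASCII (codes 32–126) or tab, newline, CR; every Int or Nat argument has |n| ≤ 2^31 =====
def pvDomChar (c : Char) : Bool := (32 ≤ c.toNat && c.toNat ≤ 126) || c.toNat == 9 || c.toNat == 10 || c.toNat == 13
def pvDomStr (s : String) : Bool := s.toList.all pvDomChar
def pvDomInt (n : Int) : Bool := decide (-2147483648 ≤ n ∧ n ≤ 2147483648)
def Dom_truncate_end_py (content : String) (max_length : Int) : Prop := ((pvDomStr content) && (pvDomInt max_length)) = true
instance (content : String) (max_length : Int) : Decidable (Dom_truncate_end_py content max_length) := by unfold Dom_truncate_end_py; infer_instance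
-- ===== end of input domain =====

-- B replaces A's single accumulator loop with an early break by building the full
-- prefix-sum table of cumulative line costs, counting how many fit the budget, and
-- slicing the kept lines; same return value, alternative decomposition (not faster).


-- ===== PORT A =====
-- A's for-loop with `break`: structural recursion over the lines carrying current_length
def pvALoop (t : Int) : List (List Char) → Int → List (List Char)
  | [], _ => []
  | l :: rest, cur =>
    if cur + (l.length : Int) + 1 > t then []
    else l :: pvALoop t rest (cur + (l.length : Int) + 1)

def truncate_end_py (content : String) (max_length : Int) : String :=
  let lines := PySem.Chars.splitOn content.toList "\n".toList
  let result_lines := pvALoop (max_length - 50) lines 0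
  let omitted : Int := (lines.length : Int) - (result_lines.length : Int)
  String.ofList (PySem.Chars.join "\n".toList result_lines ++
    "\n\n... (".toList ++ PySem.Int.toChars omitted ++ " more lines truncated)".toList)

-- ===== PORT B =====
def truncate_end_py_alt (content : String) (max_length : Int) : String :=
  let lines := PySem.Chars.splitOn content.toList "\n".toList
  let budget := max_length - 50
  -- the prefix-list building loop of Source B, state = (total, prefix)
  let prefixL := (lines.foldl
    (fun (st : Int × List Int) line =>
      (st.1 + (line.length : Int) + 1, st.2 ++ [st.1 + (line.length : Int) + 1]))
    (0, [])).2
  -- kept = sum(1 for p in prefix if p <= budget)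
  let kept : Int := prefixL.foldl (fun acc p => if p ≤ budget then acc + 1 else acc) 0
  let omitted : Int := (lines.length : Int) - kept
  String.ofList (PySem.Chars.join "\n".toList (PySem.List.slice lines none (some kept)) ++
    "\n\n... (".toList ++ PySem.Int.toChars omitted ++ " more lines truncated)".toList)

-- ===== PRECONDITION & SPEC =====
def Spec_truncate_end_py (content : String) (max_length : Int) (out : String) : Prop := out = truncate_end_py_alt content max_length
instance (content : String) (max_length : Int) (out : String) : Decidable (Spec_truncate_end_py content max_length out) := by unfold Spec_truncate_end_py; infer_instance

-- ===== CLAIM (what is proved, stated in full; the proofs are below) =====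
def Claim_equal_truncate_end_py : Prop := ∀ (content : String) (max_length : Int), Dom_truncate_end_py content max_length → Spec_truncate_end_py content max_length (truncate_end_py content max_length)

-- ===== LEMMAS AND PROOFS =====

/-- The list of cumulative costs (len+1 each) starting from `cur`. -/
def pvPrefixes : List (List Char) → Int → List Int
  | [], _ => []
  | l :: rest, cur => (cur + (l.length : Int) + 1) :: pvPrefixes rest (cur + (l.length : Int) + 1)

theorem pvPrefixes_length (lines : List (List Char)) : ∀ cur, (pvPrefixes lines cur).length = lines.length := by
  induction lines with
  | nil => intro cur; rfl
  | cons l rest ih => intro cur; simp [pvPrefixes, ih]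

theorem pvPrefixes_gt (lines : List (List Char)) : ∀ cur x, x ∈ pvPrefixes lines cur → cur < x := by
  induction lines with
  | nil => intro cur x h; simp [pvPrefixes] at h
  | cons l rest ih =>
    intro cur x h
    simp only [pvPrefixes, List.mem_cons] at h
    rcases h with h | h
    · omega
    · have := ih (cur + (l.length : Int) + 1) x h; omega

theorem pvFold_prefix (lines : List (List Char)) : ∀ (cur : Int) (acc : List Int),
    (lines.foldl
      (fun (st : Int × List Int) line =>
        (st.1 + (line.length : Int) + 1, st.2 ++ [st.1 + (line.length : Int) + 1]))
      (cur, acc)).2 = acc ++ pvPrefixes lines cur := by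
  induction lines with
  | nil => intro cur acc; simp [pvPrefixes]
  | cons l rest ih => intro cur acc; simp [pvPrefixes, ih]

theorem pvALoop_eq_take (t : Int) (lines : List (List Char)) : ∀ cur,
    pvALoop t lines cur = lines.take ((pvPrefixes lines cur).countP (fun p => decide (p ≤ t))) := by
  induction lines with
  | nil => intro cur; rfl
  | cons l rest ih =>
    intro cur
    by_cases h : cur + (l.length : Int) + 1 > t
    · have hz : (pvPrefixes rest (cur + (l.length : Int) + 1)).countP (fun p => decide (p ≤ t)) = 0 := by
        rw [List.countP_eq_zero]
        intro x hx
        have := pvPrefixes_gt rest (cur + (l.length : Int) + 1) x hx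
        simp only [decide_eq_true_eq]
        omega
      have hd : (decide (cur + (l.length : Int) + 1 ≤ t)) = false := by
        simp only [decide_eq_false_iff_not]; omega
      simp [pvALoop, pvPrefixes, h, List.countP_cons, hz]
      omega
    · have h' : cur + (l.length : Int) + 1 ≤ t := by omega
      simp only [pvALoop, pvPrefixes, List.countP_cons, decide_eq_true_eq]
      rw [if_neg (by omega)]
      rw [if_pos h']
      rw [ih]
      simp [List.take_succ_cons]

theorem truncate_end_py_eq (content : String) (max_length : Int) :
    truncate_end_py content max_length = truncate_end_py_alt content max_length := by
  simp only [truncate_end_py, truncate_end_py_alt]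
  set lines := PySem.Chars.splitOn content.toList "\n".toList with hlines
  set t := max_length - 50
  rw [pvFold_prefix lines 0 []]
  simp only [List.nil_append]
  rw [PySem.List.foldl_ite_add_one (fun p => p ≤ t) (pvPrefixes lines 0) 0]
  rw [pvALoop_eq_take t lines 0]
  set k := (pvPrefixes lines 0).countP (fun p => decide (p ≤ t)) with hk
  have hkle : k ≤ lines.length := by
    calc k ≤ (pvPrefixes lines 0).length := List.countP_le_length
    _ = lines.length := pvPrefixes_length lines 0
  have hslice : PySem.List.slice lines none (some ((0 : Int) + (k : Int))) = lines.take k := by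
    rw [zero_add, PySem.List.slice_to_natCast]
  rw [hslice]
  have hlen : ((lines.take k).length : Int) = (0 : Int) + (k : Int) := by
    simp [List.length_take, Nat.min_eq_left hkle]
  rw [hlen]

-- ===== VERDICT (by name: the statement is the Claim_ definition above) =====
theorem truncate_end_py_spec : Claim_equal_truncate_end_py := by
  intro content max_length _
  unfold Spec_truncate_end_py
  exact truncate_end_py_eq content max_length
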